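-- pv_equiv track=rewrite | github.com/VadimKuznetsov1986/homework3 | task5.py | fibo_list
-- ===== SOURCE A (Python) =====
-- def fibo_list(num):
--     lst = [0, 1]
--     res_lst = [-1]
--     f1, f2 = 0, 1
--     for _ in range(num - 1):
--         lst.append(f1 + f2)
--         res_lst.append(-(f1 + f2))
--         f1, f2 = f2, f1 + f2
--     res_lst.reverse()
--     res_lst.extend(lst)
--     return res_lst
-- ===== SOURCE B (Python) =====
-- def _fib_pair(n):
--     # fast doubling: returns (fib(n), fib(n+1))
--     if n == 0:
--         return (0, 1)
--     a, b = _fib_pair(n // 2)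
--     c = a * (2 * b - a)
--     d = a * a + b * b
--     return (d, c + d) if n % 2 else (c, d)
--
--
-- def fibo_list(num):
--     n = max(num, 1)
--     fibs = [_fib_pair(i)[0] for i in range(n + 1)]
--     return [-x for x in fibs[:1:-1]] + [-1] + fibs
-- ===== Notes on version B (the rewrite author's own statement) =====
-- stated objective: alternative
-- what changed: B computes each Fibonacci number independently by recursive fast doubling (fib(2k)/fib(2k+1) identities) over an index range and assembles the symmetric list in one expression, instead of A's dual-accumulator iterative recurrence loop.
import Mathlib
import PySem

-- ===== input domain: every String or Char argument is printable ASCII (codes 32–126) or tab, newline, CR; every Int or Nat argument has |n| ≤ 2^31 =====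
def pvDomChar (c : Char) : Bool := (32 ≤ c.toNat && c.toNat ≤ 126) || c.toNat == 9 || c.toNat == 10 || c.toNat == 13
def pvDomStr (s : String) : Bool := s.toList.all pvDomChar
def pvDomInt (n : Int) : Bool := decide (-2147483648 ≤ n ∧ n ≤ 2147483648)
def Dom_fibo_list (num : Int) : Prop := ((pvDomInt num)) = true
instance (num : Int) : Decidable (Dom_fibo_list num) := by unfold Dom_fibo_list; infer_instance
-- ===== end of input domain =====

-- B computes each Fibonacci number independently by recursive fast doubling over an index
-- range instead of A's dual-accumulator iterative recurrence loop; objective: alternative.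

-- ===== PORT A =====
-- the for-loop over range(num - 1): runs (num - 1).toNat times, carrying (lst, res_lst, f1, f2)
def fiboLoopA : Nat → List Int → List Int → Int → Int → (List Int × List Int)
  | 0, lst, res, _, _ => (lst, res)
  | n + 1, lst, res, f1, f2 => fiboLoopA n (lst ++ [f1 + f2]) (res ++ [-(f1 + f2)]) f2 (f1 + f2)

def fibo_list (num : Int) : List Int :=
  let p := fiboLoopA (num - 1).toNat [0, 1] [-1] 0 1
  p.2.reverse ++ p.1

-- ===== PORT B =====
-- _fib_pair(n) on a nonnegative int: recursion on n // 2, returns (fib n, fib (n+1))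
def fibPair : Nat → Int × Int
  | 0 => (0, 1)
  | n + 1 =>
    let p := fibPair ((n + 1) / 2)
    let a := p.1
    let b := p.2
    let c := a * (2 * b - a)
    let d := a * a + b * b
    if (n + 1) % 2 = 1 then (d, c + d) else (c, d)
decreasing_by exact Nat.div_lt_self (Nat.succ_pos n) (by norm_num)

-- n = max(num, 1) ≥ 1, so toNat is exact and range(n + 1) is List.range over Nat;
-- fibs[:1:-1] = reversed(fibs[2:]) = (fibs.drop 2).reverse, exact since fibs has ≥ 2 elements
def fibo_list_alt (num : Int) : List Int :=
  let n := (max num 1).toNat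
  let fibs := (List.range (n + 1)).map (fun i => (fibPair i).1)
  ((fibs.drop 2).reverse.map (fun x => -x)) ++ [-1] ++ fibs

-- ===== PRECONDITION & SPEC =====
def Spec_fibo_list (num : Int) (out : List Int) : Prop := out = fibo_list_alt num
instance (num : Int) (out : List Int) : Decidable (Spec_fibo_list num out) := by unfold Spec_fibo_list; infer_instance

-- ===== CLAIM (what is proved, stated in full; the proofs are below) =====
def Claim_equal_fibo_list : Prop := ∀ (num : Int), Dom_fibo_list num → Spec_fibo_list num (fibo_list num)

-- ===== LEMMAS AND PROOFS =====

-- fast doubling computes Fibonacci numbers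
theorem fibPair_eq (n : Nat) : fibPair n = ((Nat.fib n : Int), (Nat.fib (n + 1) : Int)) := by
  induction n using Nat.strong_induction_on with
  | _ n ih =>
    match n with
    | 0 => simp [fibPair]
    | m + 1 =>
      rw [fibPair, ih ((m + 1) / 2) (Nat.div_lt_self (Nat.succ_pos m) (by norm_num))]
      set k := (m + 1) / 2 with hk
      have hle : Nat.fib k ≤ 2 * Nat.fib (k + 1) :=
        le_trans (Nat.fib_le_fib_succ) (by omega)
      have h2 : ((Nat.fib (2 * k) : Int)) = (Nat.fib k : Int) * (2 * (Nat.fib (k + 1) : Int) - (Nat.fib k : Int)) := by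
        have := Nat.fib_two_mul k
        push_cast [this, hle]
        ring
      have h21 : ((Nat.fib (2 * k + 1) : Int)) = (Nat.fib k : Int) * (Nat.fib k : Int) + (Nat.fib (k + 1) : Int) * (Nat.fib (k + 1) : Int) := by
        have := Nat.fib_two_mul_add_one k
        push_cast [this]
        ring
      by_cases hp : (m + 1) % 2 = 1
      · -- odd: m + 1 = 2 * k + 1
        have e1 : m + 1 = 2 * k + 1 := by omega
        simp only [hp, if_pos]
        refine Prod.ext ?_ ?_
        · show (Nat.fib k : Int) * (Nat.fib k : Int) + (Nat.fib (k + 1) : Int) * (Nat.fib (k + 1) : Int) = _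
          rw [e1, h21]
        · show (Nat.fib k : Int) * (2 * (Nat.fib (k + 1) : Int) - (Nat.fib k : Int)) + ((Nat.fib k : Int) * (Nat.fib k : Int) + (Nat.fib (k + 1) : Int) * (Nat.fib (k + 1) : Int)) = _
          have e2 : m + 1 + 1 = 2 * k + 2 := by omega
          rw [e2, show 2 * k + 2 = 2 * k + 1 + 1 from rfl]
          have hadd : ((Nat.fib (2 * k + 1 + 1) : Int)) = (Nat.fib (2 * k) : Int) + (Nat.fib (2 * k + 1) : Int) := by
            push_cast [Nat.fib_add_two]; ring
          rw [hadd, h2, h21]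
      · -- even: m + 1 = 2 * k
        have e1 : m + 1 = 2 * k := by omega
        simp only [hp, ite_false]
        refine Prod.ext ?_ ?_
        · show (Nat.fib k : Int) * (2 * (Nat.fib (k + 1) : Int) - (Nat.fib k : Int)) = _
          rw [e1, h2]
        · show (Nat.fib k : Int) * (Nat.fib k : Int) + (Nat.fib (k + 1) : Int) * (Nat.fib (k + 1) : Int) = _
          rw [show m + 1 + 1 = 2 * k + 1 from by omega, h21]

-- A's loop starting from (fib k, fib (k+1)) appends fib (k+2+i) and its negation, i < n
theorem fiboLoopA_eq (n : Nat) (k : Nat) (lst res : List Int) :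
    fiboLoopA n lst res (Nat.fib k) (Nat.fib (k + 1)) =
      (lst ++ (List.range n).map (fun i => ((Nat.fib (k + 2 + i) : Int))),
       res ++ (List.range n).map (fun i => -((Nat.fib (k + 2 + i) : Int)))) := by
  induction n generalizing k lst res with
  | zero => simp [fiboLoopA]
  | succ n ih =>
    rw [fiboLoopA]
    have hsum : (Nat.fib k : Int) + (Nat.fib (k + 1) : Int) = (Nat.fib (k + 1 + 1) : Int) := by
      push_cast [Nat.fib_add_two]; ring
    rw [hsum, ih (k + 1)]
    have hfun1 : (fun i => ((Nat.fib (k + 1 + 2 + i) : Int))) = (fun i => ((Nat.fib (k + 2 + (i + 1)) : Int))) := by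
      funext i
      exact congrArg (fun x => ((Nat.fib x : Int))) (by omega : k + 1 + 2 + i = k + 2 + (i + 1))
    have hfun2 : (fun i => -((Nat.fib (k + 1 + 2 + i) : Int))) = (fun i => -((Nat.fib (k + 2 + (i + 1)) : Int))) := by
      funext i
      exact congrArg (fun x => -((Nat.fib x : Int))) (by omega : k + 1 + 2 + i = k + 2 + (i + 1))
    have hhead : ((Nat.fib (k + 1 + 1) : Int)) = ((Nat.fib (k + 2 + 0) : Int)) :=
      congrArg (fun x => ((Nat.fib x : Int))) (by omega : k + 1 + 1 = k + 2 + 0)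
    rw [hfun1, hfun2]
    simp [List.range_succ_eq_map, hhead, Function.comp]

-- ===== VERDICT (by name: the statement is the Claim_ definition above) =====
theorem fibo_list_spec : Claim_equal_fibo_list := by
  intro num _
  show (fiboLoopA (num - 1).toNat [0, 1] [-1] 0 1).2.reverse ++ (fiboLoopA (num - 1).toNat [0, 1] [-1] 0 1).1
      = (List.map (fun x => -x) (List.drop 2 ((List.range ((max num 1).toNat + 1)).map (fun i => (fibPair i).1))).reverse) ++ [-1]
        ++ (List.range ((max num 1).toNat + 1)).map (fun i => (fibPair i).1)
  have hA := fiboLoopA_eq (num - 1).toNat 0 [0, 1] [-1]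
  have h0 : ((Nat.fib 0 : Int)) = 0 := by norm_num
  have h1 : ((Nat.fib (0 + 1) : Int)) = 1 := by norm_num
  rw [h0, h1] at hA
  rw [hA]
  have hm : (max num 1).toNat = (num - 1).toNat + 1 := by omega
  rw [hm]
  set t := (num - 1).toNat with ht
  have hr : List.range (t + 1 + 1) = List.range 2 ++ (List.range t).map (fun i => 2 + i) := by
    rw [show t + 1 + 1 = 2 + t from by omega, List.range_add]
  rw [hr]
  simp only [List.map_append, List.map_map, fibPair_eq]
  have h2r : List.range 2 = [0, 1] := by decide
  rw [h2r]
  simp only [Function.comp_def]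
  simp [List.reverse_append]
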